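-- pv_equiv track=rewrite | github.com/disalinas/GeneradorPalabras | ficheros/funciones.py | getPermutaciones
-- ===== SOURCE A (Python) =====
-- def getPermutaciones(alfabeto):
--     permutaciones = []
--     for letra in alfabeto:
--         lista = list(alfabeto)
--         lista.remove(letra)
--         devolucion = getPermutaciones(lista)
--
--         if len(devolucion) > 0:
--             for permutacion in devolucion:
--                 permutaciones.append(letra + permutacion)
--         else:
--             permutaciones.append(letra)
--     return permutaciones
-- ===== SOURCE B (Python) =====
-- def getPermutaciones(alfabeto):
--     # Iterative level-by-level expansion of (prefix, remaining) states
--     # instead of recursion: same order, including duplicate handling.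
--     if not alfabeto:
--         return []
--     frontier = [("", list(alfabeto))]
--     for _ in range(len(alfabeto)):
--         nxt = []
--         for prefix, rem in frontier:
--             for x in rem:
--                 resto = list(rem)
--                 resto.remove(x)
--                 nxt.append((prefix + x, resto))
--         frontier = nxt
--     return [prefix for prefix, _ in frontier]
-- ===== Notes on version B (the rewrite author's own statement) =====
-- stated objective: alternative
-- what changed: Replaced the recursive remove-and-recurse enumeration by an iterative breadth-first expansion: a frontier of (prefix, remaining) states is expanded level by level for len(alfabeto) rounds, yielding the same permutations in the same order.
import Mathlib
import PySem

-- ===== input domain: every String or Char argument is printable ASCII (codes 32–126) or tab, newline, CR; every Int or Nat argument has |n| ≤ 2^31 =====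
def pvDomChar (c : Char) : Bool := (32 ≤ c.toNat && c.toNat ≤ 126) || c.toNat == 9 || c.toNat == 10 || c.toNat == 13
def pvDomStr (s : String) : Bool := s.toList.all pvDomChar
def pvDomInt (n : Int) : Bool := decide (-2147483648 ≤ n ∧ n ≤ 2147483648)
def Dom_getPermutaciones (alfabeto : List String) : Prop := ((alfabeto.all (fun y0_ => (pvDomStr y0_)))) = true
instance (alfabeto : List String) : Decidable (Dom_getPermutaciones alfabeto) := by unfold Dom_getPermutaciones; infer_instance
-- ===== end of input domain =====

-- B replaces A's recursion with an iterative level-by-level frontier expansion; same order and values, alternative structure (not claimed faster).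

-- termination helper for port A: list.remove of a member shortens the list by one
theorem pv_remove_len {alfabeto : List String} {v : String} (h : v ∈ alfabeto) :
    ((PySem.List.remove? alfabeto v).getD []).length + 1 = alfabeto.length := by
  rw [PySem.List.remove?_eq_some_erase _ v h]
  have h1 := List.length_erase_of_mem h
  have h2 := List.length_pos_of_mem h
  simp only [Option.getD_some]
  omega

-- ===== PORT A =====
mutual
def getPermutaciones (alfabeto : List String) : List String :=
  pvALoop alfabeto alfabeto.attach []
termination_by (alfabeto.length + 1, 0)

-- the 'for letra in alfabeto' loop of A, with its 'permutaciones' accumulator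
def pvALoop (alfabeto : List String) (rest : List {x : String // x ∈ alfabeto})
    (permutaciones : List String) : List String :=
  match rest with
  | [] => permutaciones
  | letra :: rest' =>
    let lista := (PySem.List.remove? alfabeto letra.1).getD []
    let devolucion := getPermutaciones lista
    let permutaciones' :=
      if devolucion.length > 0 then
        devolucion.foldl (fun acc permutacion => acc ++ [letra.1 ++ permutacion]) permutaciones
      else permutaciones ++ [letra.1]
    pvALoop alfabeto rest' permutaciones'
termination_by (alfabeto.length, rest.length)
decreasing_by
  · apply Prod.Lex.lt_iff.mpr
    right
    refine ⟨by exact pv_remove_len letra.2, ?_⟩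
    show (0 : Nat) < rest'.length + 1
    omega
  · apply Prod.Lex.lt_iff.mpr
    right
    refine ⟨rfl, ?_⟩
    show rest'.length < rest'.length + 1
    omega
end

-- ===== PORT B =====
-- one round of frontier expansion (the two inner 'for' loops of Source B)
def pvStep (frontier : List (String × List String)) : List (String × List String) :=
  frontier.foldl
    (fun nxt pr =>
      pr.2.foldl
        (fun nxt x => nxt ++ [(pr.1 ++ x, (PySem.List.remove? pr.2 x).getD [])])
        nxt)
    []

-- 'for _ in range(n): frontier = pvStep frontier'
def pvIter : Nat → List (String × List String) → List (String × List String)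
  | 0, frontier => frontier
  | n + 1, frontier => pvIter n (pvStep frontier)

def getPermutaciones_alt (alfabeto : List String) : List String :=
  if alfabeto.isEmpty then []
  else (pvIter alfabeto.length [("", alfabeto)]).map Prod.fst

-- ===== PRECONDITION & SPEC =====
def Spec_getPermutaciones (alfabeto : List String) (out : List String) : Prop := out = getPermutaciones_alt alfabeto
instance (alfabeto : List String) (out : List String) : Decidable (Spec_getPermutaciones alfabeto out) := by unfold Spec_getPermutaciones; infer_instance

-- ===== CLAIM (what is proved, stated in full; the proofs are below) =====
def Claim_equal_getPermutaciones : Prop := ∀ (alfabeto : List String), Dom_getPermutaciones alfabeto → Spec_getPermutaciones alfabeto (getPermutaciones alfabeto)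

-- ===== LEMMAS AND PROOFS =====

-- the block A contributes for one letra
def pvBlock (al : List String) (x : String) : List String :=
  if (getPermutaciones (al.erase x)).length > 0
  then (getPermutaciones (al.erase x)).map (fun s => x ++ s) else [x]

theorem pvALoop_char (al : List String) (rest : List {x : String // x ∈ al})
    (acc : List String) :
    pvALoop al rest acc = acc ++ rest.flatMap (fun letra => pvBlock al letra.1) := by
  induction rest generalizing acc with
  | nil => simp [pvALoop]
  | cons letra rest' ih =>
    rw [pvALoop]
    simp only [PySem.List.remove?_eq_some_erase _ _ letra.2, Option.getD_some]
    rw [ih]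
    simp only [List.flatMap_cons, pvBlock]
    split_ifs with hd
    · rw [PySem.List.foldl_append_singleton_eq_map]; simp
    · simp

theorem A_char (al : List String) :
    getPermutaciones al = al.flatMap (fun x => pvBlock al x) := by
  rw [getPermutaciones, pvALoop_char]
  simp

theorem A_ne_nil {al : List String} (h : al ≠ []) : getPermutaciones al ≠ [] := by
  obtain ⟨x, xs, rfl⟩ := List.exists_cons_of_ne_nil h
  rw [A_char]
  simp only [List.flatMap_cons]
  intro hc
  rcases List.append_eq_nil_iff.mp hc with ⟨h1, -⟩
  unfold pvBlock at h1
  by_cases hd : (getPermutaciones ((x :: xs).erase x)).length > 0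
  · rw [if_pos hd, List.map_eq_nil_iff] at h1
    rw [h1] at hd
    simp at hd
  · rw [if_neg hd] at h1
    simp at h1

theorem pvStep_char (frontier : List (String × List String)) :
    pvStep frontier =
      frontier.flatMap (fun pr => pr.2.map (fun x => (pr.1 ++ x, pr.2.erase x))) := by
  unfold pvStep
  rw [PySem.List.foldl_congr_mem frontier _
    (fun nxt pr => nxt ++ pr.2.map (fun x => (pr.1 ++ x, pr.2.erase x))) []
    (by
      intro acc pr _
      rw [PySem.List.foldl_append_singleton_eq_map]
      congr 1
      apply List.map_congr_left
      intro x hx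
      rw [PySem.List.remove?_eq_some_erase _ x hx]
      rfl)]
  rw [PySem.List.foldl_append_eq_flatMap]
  simp

theorem pvIter_nil (n : Nat) : pvIter n [] = [] := by
  induction n with
  | zero => rfl
  | succ n ih => rw [pvIter, pvStep_char]; simpa using ih

theorem pvStep_append (l1 l2 : List (String × List String)) :
    pvStep (l1 ++ l2) = pvStep l1 ++ pvStep l2 := by
  simp [pvStep_char]

theorem pvIter_append (n : Nat) (l1 l2 : List (String × List String)) :
    pvIter n (l1 ++ l2) = pvIter n l1 ++ pvIter n l2 := by
  induction n generalizing l1 l2 with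
  | zero => rfl
  | succ n ih => rw [pvIter, pvStep_append, ih]; rfl

theorem pvIter_map (n : Nat) (l : List String) (f : String → String × List String) :
    pvIter n (l.map f) = l.flatMap (fun x => pvIter n [f x]) := by
  induction l with
  | nil => simp [pvIter_nil]
  | cons x xs ih =>
    have : (x :: xs).map f = [f x] ++ xs.map f := by simp
    rw [this, pvIter_append, ih]
    simp

theorem pvMain : ∀ (n : Nat) (rem : List String) (p : String), rem.length = n + 1 →
    (pvIter (n + 1) [(p, rem)]).map Prod.fst
      = (getPermutaciones rem).map (fun s => p ++ s) := by
  intro n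
  induction n with
  | zero =>
    intro rem p h
    obtain ⟨x, rfl⟩ := List.length_eq_one_iff.mp h
    have hAnil : getPermutaciones [] = [] := by rw [A_char]; rfl
    have hAone : getPermutaciones [x] = [x] := by
      rw [A_char]
      simp [pvBlock, hAnil]
    rw [pvIter, pvIter, pvStep_char, hAone]
    simp
  | succ m ih =>
    intro rem p h
    rw [pvIter, pvStep_char]
    have hstep : ([(p, rem)] : List (String × List String)).flatMap
        (fun pr => pr.2.map fun x => (pr.1 ++ x, pr.2.erase x))
        = rem.map (fun x => (p ++ x, rem.erase x)) := by simp
    rw [hstep, pvIter_map]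
    rw [A_char, List.map_flatMap, List.map_flatMap]
    apply List.flatMap_congr
    intro x hx
    have hlen : (rem.erase x).length = m + 1 := by
      have := List.length_erase_of_mem hx; omega
    have hne : rem.erase x ≠ [] := by
      intro hc; rw [hc] at hlen; simp at hlen
    rw [ih (rem.erase x) (p ++ x) hlen]
    unfold pvBlock
    have hd : getPermutaciones (rem.erase x) ≠ [] := A_ne_nil hne
    rw [if_pos (by simpa using List.length_pos_of_ne_nil hd)]
    simp [Function.comp, String.append_assoc]

-- ===== VERDICT (by name: the statement is the Claim_ definition above) =====
theorem getPermutaciones_spec : Claim_equal_getPermutaciones := by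
  intro al _
  unfold Spec_getPermutaciones getPermutaciones_alt
  rcases eq_or_ne al [] with rfl | hne
  · simp [getPermutaciones, pvALoop]
  · rw [if_neg (by simpa using hne)]
    obtain ⟨n, hn⟩ : ∃ n, al.length = n + 1 := by
      cases al with
      | nil => exact absurd rfl hne
      | cons a as => exact ⟨as.length, rfl⟩
    rw [hn, pvMain n al "" hn]
    simp
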